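-- pv_equiv track=rewrite | github.com/markusle56/Advent-of-Code-2025 | day6.py | colNum2RowNum
-- ===== SOURCE A (Python) =====
-- def isEmptyCol(grid, i):
--     for j in range(len(grid)):
--         if grid[j][i] != " ":
--             return False
--     return True
--
-- def colNum2RowNum(grid):
--     row = []
--     new_grid = []
--     n = len(grid)
--     m = len(grid[0])
--     for i in range(m):
--         if isEmptyCol(grid, i):
--             new_grid.append(row)
--             row = []
--         else:
--             num = ""
--             for j in range(n):
--                 if grid[j][i] != " ":
--                     num += grid[j][i]
--             row.append(num)
--     new_grid.append(row)
--     return new_grid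
-- ===== SOURCE B (Python) =====
-- def colNum2RowNum(grid):
--     m = len(grid[0])
--     # one row-major pass: every column accumulates (joined non-space cells, seen-only-" "-cells flag)
--     acc = [("", True)] * m
--     for row in grid:
--         acc = [(s + (row[i] if row[i] != " " else ""), blank and row[i] == " ")
--                for i, (s, blank) in enumerate(acc)]
--
--     # recursively split on the blank-column markers (always one more group than markers)
--     def split(cs):
--         for k, (_, blank) in enumerate(cs):
--             if blank:
--                 return [cs[:k]] + split(cs[k + 1:])
--         return [cs]
--
--     return [[s for s, _ in group] for group in split(acc)]
-- ===== Notes on version B (the rewrite author's own statement) =====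
-- stated objective: alternative
-- what changed: B traverses the grid row-major in a single fold that simultaneously grows every column's joined string and an all-spaces flag, then splits the resulting column list recursively at the first flagged column (slice, recurse), instead of A's column-major loop that rescans each column twice (isEmptyCol, then char-by-char building) while interleaving group construction with an accumulator.
import Mathlib
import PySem

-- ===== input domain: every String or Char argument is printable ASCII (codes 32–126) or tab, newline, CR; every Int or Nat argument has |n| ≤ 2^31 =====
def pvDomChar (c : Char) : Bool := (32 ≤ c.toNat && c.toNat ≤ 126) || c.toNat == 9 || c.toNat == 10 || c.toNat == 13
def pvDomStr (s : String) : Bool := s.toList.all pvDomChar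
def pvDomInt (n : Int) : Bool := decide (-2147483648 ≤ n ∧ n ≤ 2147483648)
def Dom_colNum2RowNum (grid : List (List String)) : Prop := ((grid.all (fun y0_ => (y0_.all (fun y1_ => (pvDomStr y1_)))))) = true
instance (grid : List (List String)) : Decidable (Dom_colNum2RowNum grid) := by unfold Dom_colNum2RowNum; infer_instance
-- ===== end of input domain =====

-- B replaces A's column-major double-scan loop by one row-major fold building all
-- column strings and blank flags at once, then a recursive slice-based splitter;
-- objective: alternative decomposition. Option plumbing = IndexError, excluded by Pre_.

-- ===== PORT A =====
-- isEmptyCol: 'for j in range(len(grid)): if grid[j][i] != " ": return False; return True'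
def isEmptyColP : List (List String) → Int → Option Bool
  | [], _ => some true
  | r :: rs, i =>
    match PySem.List.pyGet? r i with
    | none => none
    | some c => if c ≠ " " then some false else isEmptyColP rs i

-- the inner 'num' loop: num = ""; for j in range(n): if grid[j][i] != " ": num += grid[j][i]
def buildNumP : List (List String) → Int → Option String
  | [], _ => some ""
  | r :: rs, i =>
    match PySem.List.pyGet? r i with
    | none => none
    | some c => (buildNumP rs i).map (fun rest => if c ≠ " " then c ++ rest else rest)

-- the outer 'for i in range(m)' loop, state (row, new_grid)
def loopA (grid : List (List String)) : List Int → List String → List (List String) → Option (List (List String))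
  | [], row, acc => some (acc ++ [row])
  | i :: rest, row, acc =>
    match isEmptyColP grid i with
    | none => none
    | some true => loopA grid rest [] (acc ++ [row])
    | some false =>
      match buildNumP grid i with
      | none => none
      | some num => loopA grid rest (row ++ [num]) acc

def colNum2RowNum (grid : List (List String)) : List (List String) :=
  match grid.head? with
  | none => []   -- grid[0] raises IndexError: outside Pre_
  | some r0 => (loopA grid (PySem.List.pyRange 0 (r0.length : Int) 1) [] []).getD []

-- ===== PORT B =====
-- the comprehension over 'enumerate(acc)': i is the running Python index into the row
def updRow (row : List String) : List (String × Bool) → Int → Option (List (String × Bool))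
  | [], _ => some []
  | (s, blank) :: cs, i =>
    match PySem.List.pyGet? row i with
    | none => none
    | some cell =>
      (updRow row cs (i + 1)).map
        (fun rest => (s ++ (if cell ≠ " " then cell else ""), blank && (cell == " ")) :: rest)

-- 'for row in grid: acc = [...]'
def foldRows : List (List String) → List (String × Bool) → Option (List (String × Bool))
  | [], acc => some acc
  | r :: rs, acc =>
    match updRow r acc 0 with
    | none => none
    | some acc' => foldRows rs acc'

-- 'for k, (_, blank) in enumerate(cs): if blank: return ...' — first flagged position
def firstBlank : List (String × Bool) → Option Nat
  | [] => none
  | p :: rest => if p.2 then some 0 else (firstBlank rest).map (· + 1)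

theorem firstBlank_lt {cs : List (String × Bool)} {k : Nat}
    (h : firstBlank cs = some k) : k < cs.length := by
  induction cs generalizing k with
  | nil => simp [firstBlank] at h
  | cons p rest ih =>
    by_cases hp : p.2 = true
    · simp [firstBlank, hp] at h
      simp only [List.length_cons]
      omega
    · simp [firstBlank, hp] at h
      obtain ⟨k', hk', rfl⟩ := h
      have := ih hk'
      simp only [List.length_cons]
      omega

-- 'split': slices cs[:k] / cs[k+1:] (k a found index, so nonnegative: take/drop are exact)
def splitRec (cs : List (String × Bool)) : List (List (String × Bool)) :=
  match h : firstBlank cs with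
  | none => [cs]
  | some k => cs.take k :: splitRec (cs.drop (k + 1))
termination_by cs.length
decreasing_by
  have hk := firstBlank_lt h
  simp only [List.length_drop]
  omega

def colNum2RowNum_alt (grid : List (List String)) : List (List String) :=
  match grid.head? with
  | none => []   -- len(grid[0]) raises IndexError: outside Pre_
  | some r0 =>
    match foldRows grid (List.replicate r0.length ("", true)) with
    | none => []
    | some acc => (splitRec acc).map (List.map Prod.fst)

-- ===== PRECONDITION & SPEC =====
-- A raises IndexError iff the grid is empty or some row is shorter than row 0
-- (every column index below len(grid[0]) is dereferenced in every row); Pre_ excludes exactly those.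
def Pre_colNum2RowNum (grid : List (List String)) : Prop :=
  grid ≠ [] ∧ ∀ r ∈ grid, (grid.headI).length ≤ r.length
instance (grid : List (List String)) : Decidable (Pre_colNum2RowNum grid) := by
  unfold Pre_colNum2RowNum; infer_instance
def pvWitness_colNum2RowNum : List (List String) := [["1", " ", "2"], ["3", " ", "4"]]

def Spec_colNum2RowNum (grid : List (List String)) (out : List (List String)) : Prop := out = colNum2RowNum_alt grid
instance (grid : List (List String)) (out : List (List String)) : Decidable (Spec_colNum2RowNum grid out) := by unfold Spec_colNum2RowNum; infer_instance

-- ===== CLAIM (what is proved, stated in full; the proofs are below) =====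
def Claim_equal_colNum2RowNum : Prop := ∀ (grid : List (List String)), Dom_colNum2RowNum grid → Pre_colNum2RowNum grid → Spec_colNum2RowNum grid (colNum2RowNum grid)

-- ===== LEMMAS AND PROOFS =====

-- reference per-column values (proof-side only)
def cellAt (r : List String) (j : Nat) : String := r.getD j " "

def colStr : List (List String) → Nat → String
  | [], _ => ""
  | r :: rs, j => (if cellAt r j ≠ " " then cellAt r j else "") ++ colStr rs j

def colBlank : List (List String) → Nat → Bool
  | [], _ => true
  | r :: rs, j => (cellAt r j == " ") && colBlank rs j

-- prepend cur onto the head group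
def consHeadS (cur : List String) : List (List String) → List (List String)
  | [] => [cur]
  | g :: gs => (cur ++ g) :: gs

def splitS (cs : List (String × Bool)) : List (List String) :=
  (splitRec cs).map (List.map Prod.fst)

-- === A-side per-column lemmas ===
theorem buildNumP_eq (rows : List (List String)) (j : Nat)
    (h : ∀ r ∈ rows, j < r.length) :
    buildNumP rows (j : Int) = some (colStr rows j) := by
  induction rows with
  | nil => rfl
  | cons r rs ih =>
    have hj : j < r.length := h r (by simp)
    simp only [buildNumP, PySem.List.pyGet?_natCast, List.getElem?_eq_getElem hj,
      ih (fun r hr => h r (by simp [hr])), Option.map_some, colStr]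
    have : cellAt r j = r[j] := by simp [cellAt, List.getD, List.getElem?_eq_getElem hj]
    rw [this]
    by_cases hc : r[j] = " " <;> simp [hc]

theorem isEmptyColP_eq (rows : List (List String)) (j : Nat)
    (h : ∀ r ∈ rows, j < r.length) :
    isEmptyColP rows (j : Int) = some (colBlank rows j) := by
  induction rows with
  | nil => rfl
  | cons r rs ih =>
    have hj : j < r.length := h r (by simp)
    have hc : cellAt r j = r[j] := by simp [cellAt, List.getD, List.getElem?_eq_getElem hj]
    simp only [isEmptyColP, PySem.List.pyGet?_natCast, List.getElem?_eq_getElem hj, colBlank, hc]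
    by_cases hsp : r[j] = " "
    · simp [hsp, ih (fun r hr => h r (by simp [hr]))]
    · simp [hsp]

-- === splitter equations ===
theorem splitRec_of_none {cs : List (String × Bool)} (h : firstBlank cs = none) :
    splitRec cs = [cs] := by
  rw [splitRec]
  split
  · rfl
  · simp_all

theorem splitRec_of_some {cs : List (String × Bool)} {k : Nat} (h : firstBlank cs = some k) :
    splitRec cs = cs.take k :: splitRec (cs.drop (k + 1)) := by
  rw [splitRec]
  split
  · simp_all
  · rename_i k' heq
    rw [heq] at h
    injection h with h
    subst h
    rfl

theorem splitS_nil : splitS [] = [[]] := by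
  have h : firstBlank ([] : List (String × Bool)) = none := rfl
  simp [splitS, splitRec_of_none h]

theorem splitS_cons_blank (p : String × Bool) (cs : List (String × Bool)) (hp : p.2 = true) :
    splitS (p :: cs) = [] :: splitS cs := by
  have h : firstBlank (p :: cs) = some 0 := by simp [firstBlank, hp]
  simp [splitS, splitRec_of_some h]

theorem splitS_cons_of_not_blank (p : String × Bool) (cs : List (String × Bool)) (hp : p.2 = false) :
    splitS (p :: cs) = consHeadS [p.1] (splitS cs) := by
  cases hfb : firstBlank cs with
  | none =>
    have h : firstBlank (p :: cs) = none := by simp [firstBlank, hp, hfb]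
    simp [splitS, splitRec_of_none h, splitRec_of_none hfb, consHeadS]
  | some k =>
    have h : firstBlank (p :: cs) = some (k + 1) := by simp [firstBlank, hp, hfb]
    simp [splitS, splitRec_of_some h, splitRec_of_some hfb, consHeadS,
      List.take_succ_cons, List.drop_succ_cons]

theorem splitS_ne_nil (cs : List (String × Bool)) : splitS cs ≠ [] := by
  unfold splitS
  cases h : firstBlank cs with
  | none => simp [splitRec_of_none h]
  | some k => simp [splitRec_of_some h]

theorem consHeadS_nil_of_ne (gs : List (List String)) (h : gs ≠ []) :
    consHeadS [] gs = gs := by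
  cases gs with
  | nil => exact absurd rfl h
  | cons g gs => simp [consHeadS]

theorem consHeadS_consHeadS (row num : List String) (gs : List (List String)) :
    consHeadS row (consHeadS num gs) = consHeadS (row ++ num) gs := by
  cases gs <;> simp [consHeadS]

-- === A's loop equals splitS of the per-column pair list ===
theorem loopA_eq_splitS (grid : List (List String)) (js : List Nat)
    (h : ∀ j ∈ js, ∀ r ∈ grid, j < r.length) :
    ∀ (row : List String) (acc : List (List String)),
      loopA grid (js.map (Nat.cast : Nat → Int)) row acc =
        some (acc ++ consHeadS row (splitS (js.map (fun j => (colStr grid j, colBlank grid j))))) := by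
  induction js with
  | nil => intro row acc; simp [loopA, splitS_nil, consHeadS]
  | cons j js ih =>
    intro row acc
    have hj : ∀ r ∈ grid, j < r.length := h j (by simp)
    have hjs : ∀ j' ∈ js, ∀ r ∈ grid, j' < r.length := fun j' hj' => h j' (by simp [hj'])
    simp only [List.map_cons, loopA]
    rw [isEmptyColP_eq grid j hj]
    cases hb : colBlank grid j with
    | true =>
      rw [splitS_cons_blank _ _ (by simp)]
      rw [ih hjs, consHeadS_nil_of_ne _ (splitS_ne_nil _)]
      simp [consHeadS, List.append_assoc]
    | false =>
      rw [buildNumP_eq grid j hj]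
      rw [splitS_cons_of_not_blank _ _ (by simp), consHeadS_consHeadS]
      simp [ih hjs]

-- === B-side: the row fold computes the per-column pairs ===
def stepP (p : String × Bool) (cell : String) : String × Bool :=
  (p.1 ++ (if cell ≠ " " then cell else ""), p.2 && (cell == " "))

theorem updRow_eq (row : List String) (cs : List (String × Bool)) :
    ∀ (n : Nat), n + cs.length ≤ row.length →
      updRow row cs (n : Int) = some (List.zipWith stepP cs (row.drop n)) := by
  induction cs with
  | nil => intro n _; simp [updRow]
  | cons p cs ih =>
    intro n hn
    obtain ⟨s, blank⟩ := p
    have hlt : n < row.length := by simp at hn; omega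
    have hdrop : row.drop n = row[n] :: row.drop (n + 1) := List.drop_eq_getElem_cons hlt
    have hcast : (n : Int) + 1 = ((n + 1 : Nat) : Int) := by push_cast; ring
    simp only [updRow, PySem.List.pyGet?_natCast, List.getElem?_eq_getElem hlt, hcast,
      ih (n + 1) (by simp at hn ⊢; omega), Option.map_some, hdrop, List.zipWith_cons_cons, stepP]

theorem foldRows_eq (rows : List (List String)) :
    ∀ (cs : List (String × Bool)), (∀ r ∈ rows, cs.length ≤ r.length) →
      foldRows rows cs = some (rows.foldl (fun a r => List.zipWith stepP a r) cs) := by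
  induction rows with
  | nil => intro cs _; rfl
  | cons r rs ih =>
    intro cs h
    have h0 : cs.length ≤ r.length := h r (by simp)
    have hz : (List.zipWith stepP cs r).length = cs.length := by
      simp [List.length_zipWith]; omega
    have hupd := updRow_eq r cs 0 (by omega)
    simp only [List.drop_zero, Int.natCast_zero] at hupd
    simp only [foldRows]
    rw [hupd]
    show foldRows rs (List.zipWith stepP cs r) = _
    rw [ih (List.zipWith stepP cs r) (fun r' hr' => by rw [hz]; exact h r' (by simp [hr']))]
    rfl

theorem foldl_zip_length (rows : List (List String)) :
    ∀ (cs : List (String × Bool)), (∀ r ∈ rows, cs.length ≤ r.length) →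
      (rows.foldl (fun a r => List.zipWith stepP a r) cs).length = cs.length := by
  induction rows with
  | nil => intro cs _; rfl
  | cons r rs ih =>
    intro cs h
    have h0 : cs.length ≤ r.length := h r (by simp)
    have hz : (List.zipWith stepP cs r).length = cs.length := by
      simp [List.length_zipWith]; omega
    simp only [List.foldl_cons]
    rw [ih (List.zipWith stepP cs r) (fun r' hr' => by rw [hz]; exact h r' (by simp [hr']))]
    exact hz

theorem foldl_stepP_pair (rows : List (List String)) (j : Nat)
    (h : ∀ r ∈ rows, j < r.length) :
    ∀ (s : String) (b : Bool),
      rows.foldl (fun p r => stepP p (cellAt r j)) (s, b) =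
        (s ++ colStr rows j, b && colBlank rows j) := by
  induction rows with
  | nil => intro s b; simp [colStr, colBlank]
  | cons r rs ih =>
    intro s b
    simp only [List.foldl_cons]
    have hstep : stepP (s, b) (cellAt r j) =
        (s ++ (if cellAt r j ≠ " " then cellAt r j else ""), b && (cellAt r j == " ")) := rfl
    rw [hstep, ih (fun r' hr' => h r' (by simp [hr']))]
    simp only [colStr, colBlank, Prod.mk.injEq]
    refine ⟨?_, ?_⟩
    · simp [String.append_assoc]
    · simp [Bool.and_assoc]

theorem foldl_zip_getElem (rows : List (List String)) :
    ∀ (cs : List (String × Bool)) (hcs : ∀ r ∈ rows, cs.length ≤ r.length),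
      ∀ (j : Nat) (hj : j < cs.length),
        (rows.foldl (fun a r => List.zipWith stepP a r) cs)[j]'(by rw [foldl_zip_length rows cs hcs]; exact hj) =
          rows.foldl (fun p r => stepP p (cellAt r j)) cs[j] := by
  induction rows with
  | nil => intro cs _ j hj; rfl
  | cons r rs ih =>
    intro cs h j hj
    have h0 : cs.length ≤ r.length := h r (by simp)
    have hz : (List.zipWith stepP cs r).length = cs.length := by
      simp [List.length_zipWith]; omega
    have hjr : j < r.length := by omega
    simp only [List.foldl_cons]
    rw [ih (List.zipWith stepP cs r) (fun r' hr' => by rw [hz]; exact h r' (by simp [hr'])) j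
      (by rw [hz]; exact hj)]
    congr 1
    rw [List.getElem_zipWith]
    congr 1
    simp [cellAt, List.getD, List.getElem?_eq_getElem hjr]

-- the fold result IS the per-column pair list
theorem foldRows_replicate (grid : List (List String)) (m : Nat)
    (h : ∀ r ∈ grid, m ≤ r.length) :
    foldRows grid (List.replicate m ("", true)) =
      some ((List.range m).map (fun j => (colStr grid j, colBlank grid j))) := by
  rw [foldRows_eq grid _ (by simpa using h)]
  congr 1
  apply List.ext_getElem
  · rw [foldl_zip_length grid _ (by simpa using h)]; simp
  · intro j hj1 hj2
    have hjm : j < m := by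
      have := foldl_zip_length grid (List.replicate m ("", true)) (by simpa using h)
      rw [this] at hj1; simpa using hj1
    rw [foldl_zip_getElem grid _ (by simpa using h) j (by simpa using hjm)]
    have hcell : ∀ r ∈ grid, j < r.length := fun r hr => lt_of_lt_of_le hjm (h r hr)
    rw [List.getElem_replicate, foldl_stepP_pair grid j hcell]
    simp

-- ===== VERDICT (by name: the statement is the Claim_ definition above) =====
theorem colNum2RowNum_spec : Claim_equal_colNum2RowNum := by
  intro grid _ hpre
  obtain ⟨hne, hlen⟩ := hpre
  unfold Spec_colNum2RowNum colNum2RowNum colNum2RowNum_alt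
  cases grid with
  | nil => exact absurd rfl hne
  | cons r0 rs =>
    simp only [List.head?_cons, List.headI] at hlen ⊢
    set grid := r0 :: rs with hgrid
    have hrange : PySem.List.pyRange 0 (r0.length : Int) 1 =
        (List.range r0.length).map (Nat.cast : Nat → Int) := by
      rw [PySem.List.pyRange_one]
      simp only [sub_zero, Int.toNat_natCast, zero_add]
    rw [hrange,
      loopA_eq_splitS grid (List.range r0.length)
        (fun j hj r hr => lt_of_lt_of_le (by simpa using hj) (hlen r hr)) [] [],
      foldRows_replicate grid r0.length hlen]
    rw [consHeadS_nil_of_ne _ (splitS_ne_nil _)]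
    rfl
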